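-- pv_equiv track=rewrite | github.com/Crazysiri/chineseholiday | lunar.py | _enumMonth
-- ===== SOURCE A (Python) =====
-- def _enumMonth(yearInfo):
--     months = [(i, 0) for i in range(1, 13)]
--     leapMonth = yearInfo % 16
--     if leapMonth == 0:
--         pass
--     elif leapMonth <= 12:
--         months.insert(leapMonth, (leapMonth, 1))
--     else:
--         raise ValueError("yearInfo %r mod 16 should in [0, 12]" % yearInfo)
--
--     for month, isLeapMonth in months:
--         if isLeapMonth:
--             days = (yearInfo >> 16) % 2 + 29
--         else:
--             days = (yearInfo >> (16 - month)) % 2 + 29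
--         yield month, days, isLeapMonth
-- ===== SOURCE B (Python) =====
-- def _enumMonth(yearInfo):
--     leapMonth = yearInfo % 16
--     if leapMonth > 12:
--         raise ValueError("yearInfo %r mod 16 should in [0, 12]" % yearInfo)
--     # decompose yearInfo's day-count bits once, LSB first: bits[k] = bit 4+k,
--     # so bits[12 - month] is month's bit and bits[12] is the leap month's bit
--     n = yearInfo >> 4
--     bits = []
--     for _ in range(13):
--         bits.append(n % 2)
--         n >>= 1
--     leapDays = bits[12] + 29
--     # assemble back-to-front, from month 12 down to month 1, prepending
--     out = []
--     month = 12
--     for b in bits[:12]: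
--         entry = [(month, b + 29, 0)]
--         if month == leapMonth:
--             entry.append((leapMonth, leapDays, 1))
--         out = entry + out
--         month -= 1
--     yield from out
-- ===== Notes on version B (the rewrite author's own statement) =====
-- stated objective: alternative
-- what changed: B replaces A's per-month bit shifting over a built-then-iterated month table with a one-time bit decomposition of yearInfo (repeated %2/>>1) and assembles the result back-to-front from month 12 to 1, prepending each entry (with the leap entry attached to its month) instead of inserting into a table.
import Mathlib
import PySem

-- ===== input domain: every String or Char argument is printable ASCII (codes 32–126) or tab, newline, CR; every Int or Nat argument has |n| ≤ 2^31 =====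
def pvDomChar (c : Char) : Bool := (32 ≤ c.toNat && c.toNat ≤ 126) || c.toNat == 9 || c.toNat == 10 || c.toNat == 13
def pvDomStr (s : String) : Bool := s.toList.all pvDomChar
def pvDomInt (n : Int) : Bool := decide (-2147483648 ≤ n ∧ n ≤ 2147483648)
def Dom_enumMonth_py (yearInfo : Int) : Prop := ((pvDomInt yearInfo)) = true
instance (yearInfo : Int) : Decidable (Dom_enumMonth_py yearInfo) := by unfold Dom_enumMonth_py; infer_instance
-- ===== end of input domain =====

-- B decomposes yearInfo's bits once (repeated %2 / >>1) and assembles the list back-to-front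
-- from month 12 down to 1, instead of A's build-table / insert-leap / shift-per-month pass
-- (objective: alternative decomposition).

-- ===== PORT A =====
-- A's table-building steps: months = [(i,0) for i in range(1,13)], then insert the leap entry.
def enumMonthTable (leapMonth : Int) : List (Int × Int) :=
  let months : List (Int × Int) := (PySem.List.pyRange 1 13 1).map (fun i => (i, (0 : Int)))
  if leapMonth = 0 then months
  else if leapMonth ≤ 12 then PySem.List.insert months leapMonth (leapMonth, (1 : Int))
  else []  -- Python raises ValueError here; excluded by Pre_enumMonth_py

-- the loop body: yield month, days, isLeapMonth
def enumMonthDays (yearInfo : Int) (p : Int × Int) : Int × Int × Int :=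
  if p.2 ≠ 0 then (p.1, PySem.Int.mod (yearInfo >>> (16 : Nat)) 2 + 29, p.2)
  else (p.1, PySem.Int.mod (yearInfo >>> (16 - p.1).toNat) 2 + 29, p.2)

def enumMonth_py (yearInfo : Int) : List (Int × Int × Int) :=
  (enumMonthTable (PySem.Int.mod yearInfo 16)).map (enumMonthDays yearInfo)

-- ===== PORT B =====
-- the bit-extraction loop: for _ in range(13): bits.append(n % 2); n >>= 1
def enumMonthBits (yearInfo : Int) : List Int :=
  ((List.range 13).foldl
    (fun (s : List Int × Int) _ => (s.1 ++ [PySem.Int.mod s.2 2], s.2 >>> (1 : Nat)))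
    ([], yearInfo >>> (4 : Nat))).1

-- the assembly loop: back-to-front over bits[:12], month from 12 down to 1, prepending
def enumMonth_py_alt (yearInfo : Int) : List (Int × Int × Int) :=
  let leapMonth : Int := PySem.Int.mod yearInfo 16
  if 12 < leapMonth then []  -- Python raises ValueError here; excluded by Pre_enumMonth_py
  else
    let bits := enumMonthBits yearInfo
    let leapDays : Int := bits.getD 12 0 + 29
    ((bits.take 12).foldl
      (fun (s : List (Int × Int × Int) × Int) b =>
        (((s.2, b + 29, (0 : Int)) ::
          (if s.2 = leapMonth then [(leapMonth, leapDays, (1 : Int))] else [])) ++ s.1,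
         s.2 - 1))
      ([], 12)).1

-- ===== PRECONDITION & SPEC =====
-- Pre_ excludes exactly the inputs where A raises ValueError (yearInfo % 16 ∈ {13,14,15}).
def Pre_enumMonth_py (yearInfo : Int) : Prop := PySem.Int.mod yearInfo 16 ≤ 12
instance (yearInfo : Int) : Decidable (Pre_enumMonth_py yearInfo) := by unfold Pre_enumMonth_py; infer_instance
def pvWitness_enumMonth_py : Int := 5

def Spec_enumMonth_py (yearInfo : Int) (out : List (Int × Int × Int)) : Prop := out = enumMonth_py_alt yearInfo
instance (yearInfo : Int) (out : List (Int × Int × Int)) : Decidable (Spec_enumMonth_py yearInfo out) := by unfold Spec_enumMonth_py; infer_instance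

-- ===== CLAIM (what is proved, stated in full; the proofs are below) =====
def Claim_equal_enumMonth_py : Prop := ∀ (yearInfo : Int), Dom_enumMonth_py yearInfo → Pre_enumMonth_py yearInfo → Spec_enumMonth_py yearInfo (enumMonth_py yearInfo)

-- ===== LEMMAS AND PROOFS =====

theorem enumMonth_core (y L : Int) (hL : PySem.Int.mod y 16 = L) (h0 : 0 ≤ L) (h12 : L ≤ 12) :
    enumMonth_py y = enumMonth_py_alt y := by
  have pyR : PySem.List.pyRange 1 13 1 = [1,2,3,4,5,6,7,8,9,10,11,12] := by decide
  have rg : List.range 13 = [0,1,2,3,4,5,6,7,8,9,10,11,12] := by decide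
  interval_cases L <;>
  · unfold enumMonth_py enumMonth_py_alt enumMonthBits
    rw [hL]
    norm_num [pyR, rg, enumMonthTable, PySem.List.insert_ofNat, enumMonthDays,
      List.foldl, ← Int.shiftRight_add, Int.toNat]

-- ===== VERDICT (by name: the statement is the Claim_ definition above) =====
theorem enumMonth_py_spec : Claim_equal_enumMonth_py := by
  intro y _ hpre
  unfold Pre_enumMonth_py at hpre
  have h0 : 0 ≤ PySem.Int.mod y 16 := PySem.Int.mod_nonneg y (by norm_num)
  exact enumMonth_core y (PySem.Int.mod y 16) rfl h0 hpre
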